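-- pv_equiv track=rewrite | github.com/lwmcdona/AdventOfCode2023 | day14/part2.py | rollSouth
-- ===== SOURCE A (Python) =====
-- def rollSouth(lines, max_load):
--     load = 0
--     num_rows = len(lines)
--     num_cols = len(lines[0])
--     for i in range(num_rows - 1, -1, -1):
--         for j in range(num_cols):
--             if lines[i][j] == 'O':
--                 row = i
--                 while row < num_rows - 1 and lines[row + 1][j] == '.':
--                     lines[i][j] = '.'
--                     row += 1
--
--                 lines[row][j] = 'O'
--
--                 # calculate the load for rock
--                 load += max_load - row
--     return load
-- ===== SOURCE B (Python) =====
-- def rollSouth(lines, max_load):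
--     # Single pass per column tracking the next landing row (reset below barriers).
--     # Computes the same load without mutating the grid (A mutates `lines` in place).
--     load = 0
--     num_rows = len(lines)
--     num_cols = len(lines[0])
--     for j in range(num_cols):
--         land = num_rows - 1
--         for i in range(num_rows - 1, -1, -1):
--             cell = lines[i][j]
--             if cell == 'O':
--                 load += max_load - land
--                 land -= 1
--             elif cell != '.':
--                 land = i - 1
--     return load
-- ===== Notes on version B (the rewrite author's own statement) =====
-- stated objective: alternative
-- what changed: A simulates each rock's fall with an inner while loop and mutates the grid in place; B makes a single bottom-up pass per column keeping one 'next landing row' pointer (decremented per rock, reset below barriers), never mutating the grid.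
import Mathlib
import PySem

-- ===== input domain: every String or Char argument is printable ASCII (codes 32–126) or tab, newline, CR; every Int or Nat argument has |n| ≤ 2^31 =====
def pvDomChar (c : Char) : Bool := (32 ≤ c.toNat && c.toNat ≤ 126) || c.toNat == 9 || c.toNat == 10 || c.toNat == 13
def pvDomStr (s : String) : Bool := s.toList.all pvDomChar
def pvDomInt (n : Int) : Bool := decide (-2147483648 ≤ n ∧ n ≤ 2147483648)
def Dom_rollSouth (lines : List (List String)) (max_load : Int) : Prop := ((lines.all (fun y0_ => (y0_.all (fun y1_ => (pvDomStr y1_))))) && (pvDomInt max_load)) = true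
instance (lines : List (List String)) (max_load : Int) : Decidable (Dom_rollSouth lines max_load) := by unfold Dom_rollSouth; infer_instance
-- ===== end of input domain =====

-- B replaces A's per-rock falling simulation (inner while + in-place grid mutation) by a single
-- bottom-up pass per column tracking the next landing row; equal RETURN value only: A mutates
-- `lines` in place, B does not.

-- ===== PORT A =====
-- lines[i][j] read (in range whenever Pre_ holds; default "" outside)
def pvCell (g : List (List String)) (i j : Nat) : String := (g.getD i []).getD j ""
-- lines[i][j] = v
def pvSet (g : List (List String)) (i j : Nat) (v : String) : List (List String) :=
  g.set i ((g.getD i []).set j v)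

-- while row < num_rows - 1 and lines[row+1][j] == '.': lines[i][j] = '.'; row += 1
def pvWhile (g : List (List String)) (n i j row : Nat) : List (List String) × Nat :=
  if h : row < n - 1 ∧ pvCell g (row + 1) j = "." then
    pvWhile (pvSet g i j ".") n i j (row + 1)
  else (g, row)
termination_by n - 1 - row
decreasing_by omega

-- body of the two nested for loops of A
def pvStep (n : Nat) (ml : Int) (i : Nat) (s : List (List String) × Int) (j : Nat) :
    List (List String) × Int :=
  if pvCell s.1 i j = "O" then
    let w := pvWhile s.1 n i j i
    (pvSet w.1 w.2 j "O", s.2 + (ml - (w.2 : Int)))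
  else s

def rollSouth (lines : List (List String)) (max_load : Int) : Int :=
  let n := lines.length
  let m := (lines.getD 0 []).length
  (((List.range n).reverse).foldl
    (fun s i => (List.range m).foldl (pvStep n max_load i) s) (lines, 0)).2

-- ===== PORT B =====
-- body of B's inner loop: state (land, load)
def bstep (lines : List (List String)) (ml : Int) (j : Nat) (s : Int × Int) (i : Nat) :
    Int × Int :=
  let cell := pvCell lines i j
  if cell = "O" then (s.1 - 1, s.2 + (ml - s.1))
  else if ¬ (cell = ".") then ((i : Int) - 1, s.2)
  else s

def rollSouth_alt (lines : List (List String)) (max_load : Int) : Int :=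
  let n := lines.length
  let m := (lines.getD 0 []).length
  (List.range m).foldl (fun load j =>
    (((List.range n).reverse).foldl (bstep lines max_load j) ((n : Int) - 1, load)).2) 0

-- ===== PRECONDITION & SPEC =====
-- A raises IndexError on [] (lines[0]) and on any row shorter than the first row
-- (lines[i][j] with j < len(lines[0])); Pre_ excludes exactly those inputs.
def Pre_rollSouth (lines : List (List String)) (max_load : Int) : Prop :=
  lines ≠ [] ∧ ∀ r ∈ lines, (lines.getD 0 []).length ≤ r.length

instance (lines : List (List String)) (max_load : Int) : Decidable (Pre_rollSouth lines max_load) := by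
  unfold Pre_rollSouth; infer_instance

def pvWitness_rollSouth : List (List String) × Int :=
  ([["O", "."], [".", "#"], [".", "O"]], 5)

def Spec_rollSouth (lines : List (List String)) (max_load : Int) (out : Int) : Prop := out = rollSouth_alt lines max_load
instance (lines : List (List String)) (max_load : Int) (out : Int) : Decidable (Spec_rollSouth lines max_load out) := by unfold Spec_rollSouth; infer_instance

-- ===== CLAIM (what is proved, stated in full; the proofs are below) =====
def Claim_equal_rollSouth : Prop := ∀ (lines : List (List String)) (max_load : Int), Dom_rollSouth lines max_load → Pre_rollSouth lines max_load → Spec_rollSouth lines max_load (rollSouth lines max_load)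

-- ===== LEMMAS AND PROOFS =====

theorem pvSet_length (g : List (List String)) (i j : Nat) (v : String) :
    (pvSet g i j v).length = g.length := by simp [pvSet]

theorem pvSet_rowlen (g : List (List String)) (i j : Nat) (v : String) (t : Nat) :
    ((pvSet g i j v).getD t []).length = (g.getD t []).length := by
  simp only [pvSet, List.getD, List.getElem?_set]
  rcases eq_or_ne i t with rfl | h
  · by_cases hi : i < g.length
    · simp [hi]
    · simp [hi]
  · simp [h]

theorem pvCell_pvSet_ne_row (g : List (List String)) {i t : Nat} (h : t ≠ i) (j j' : Nat) (v : String) :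
    pvCell (pvSet g i j v) t j' = pvCell g t j' := by
  simp [pvCell, pvSet, List.getD, List.getElem?_set_ne (Ne.symm h)]

theorem pvCell_pvSet_ne_col (g : List (List String)) {j j' : Nat} (h : j' ≠ j) (i t : Nat) (v : String) :
    pvCell (pvSet g i j v) t j' = pvCell g t j' := by
  rcases eq_or_ne t i with rfl | ht
  · by_cases hi : t < g.length
    · simp [pvCell, pvSet, List.getD, List.getElem?_set_self hi,
        List.getElem?_set_ne (Ne.symm h)]
    · have h0 : ∀ r : List String, g.set t r = g := fun r => List.set_eq_of_length_le (by omega)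
      simp [pvCell, pvSet, h0]
  · exact pvCell_pvSet_ne_row g ht j j' v

theorem pvCell_pvSet_self (g : List (List String)) (i j : Nat) (v : String)
    (hi : i < g.length) (hj : j < (g.getD i []).length) :
    pvCell (pvSet g i j v) i j = v := by
  rw [List.getD_eq_getElem?_getD] at hj
  simp only [pvCell, pvSet, List.getD_eq_getElem?_getD, List.getElem?_set_self hi,
    Option.getD_some, List.getElem?_set_self hj]

theorem pvSet_pvSet (g : List (List String)) (i j : Nat) (v v' : String) :
    pvSet (pvSet g i j v) i j v' = pvSet g i j v' := by
  by_cases hi : i < g.length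
  · simp only [pvSet, List.getD_eq_getElem?_getD, List.getElem?_set_self hi,
      Option.getD_some, List.set_set]
  · have h0 : ∀ r : List String, g.set i r = g := fun r => List.set_eq_of_length_le (by omega)
    simp [pvSet, h0]

theorem pvWhile_run (n i0 j r : Nat) (hrn : r < n) :
    ∀ (k row : Nat) (g : List (List String)), r - row = k → i0 ≤ row → row ≤ r →
    (∀ t, row < t → t ≤ r → pvCell g t j = ".") →
    (r + 1 < n → pvCell g (r + 1) j ≠ ".") →
    pvWhile g n i0 j row = (if row < r then pvSet g i0 j "." else g, r) := by
  intro k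
  induction k with
  | zero =>
    intro row g hk h0 h1 hdots hstop
    have hrr : row = r := by omega
    subst hrr
    rw [pvWhile, dif_neg, if_neg (by omega)]
    rintro ⟨hc1, hc2⟩
    exact hstop (by omega) hc2
  | succ k ih =>
    intro row g hk h0 h1 hdots hstop
    have hlt : row < r := by omega
    have hc : row < n - 1 ∧ pvCell g (row + 1) j = "." :=
      ⟨by omega, hdots (row + 1) (by omega) (by omega)⟩
    rw [pvWhile, dif_pos hc]
    rw [ih (row + 1) (pvSet g i0 j ".") (by omega) (by omega) (by omega)
      (fun t ht1 ht2 => by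
        rw [pvCell_pvSet_ne_row g (by omega) j j "."]
        exact hdots t (by omega) ht2)
      (fun hr1 => by
        rw [pvCell_pvSet_ne_row g (by omega) j j "."]
        exact hstop hr1)]
    by_cases h2 : row + 1 < r
    · rw [if_pos h2, if_pos hlt, pvSet_pvSet]
    · rw [if_neg h2, if_pos hlt]

def ColInv (lines g : List (List String)) (n i j : Nat) (ℓ : Int) : Prop :=
  (∀ t, t < i → pvCell g t j = pvCell lines t j) ∧
  ((i : Int) - 1 ≤ ℓ) ∧ (ℓ < (n : Int)) ∧
  (∀ t : Nat, i ≤ t → (t : Int) ≤ ℓ → pvCell g t j = ".") ∧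
  (ℓ + 1 < (n : Int) → pvCell g (ℓ + 1).toNat j ≠ ".")

theorem ColInv_transfer (lines g g' : List (List String)) (n i j : Nat) (ℓ : Int)
    (hcell : ∀ t, pvCell g' t j = pvCell g t j) (h : ColInv lines g n i j ℓ) :
    ColInv lines g' n i j ℓ := by
  obtain ⟨h1, h2, h3, h4, h5⟩ := h
  exact ⟨fun t ht => (hcell t).trans (h1 t ht), h2, h3,
    fun t ht1 ht2 => (hcell t).trans (h4 t ht1 ht2), fun hl => (hcell _) ▸ h5 hl⟩

theorem crux (lines g : List (List String)) (n m : Nat) (ml L : Int) (i j : Nat) (ℓ : Int)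
    (hgn : g.length = n) (hln : lines.length = n)
    (hrl : ∀ t, (g.getD t []).length = (lines.getD t []).length)
    (hrect : ∀ t, t < n → m ≤ (lines.getD t []).length)
    (hj : j < m) (hi1 : 1 ≤ i) (hin : i ≤ n)
    (hinv : ColInv lines g n i j ℓ) :
    (pvStep n ml (i - 1) (g, L) j).2 = L + (bstep lines ml j (ℓ, 0) (i - 1)).2 ∧
    (pvStep n ml (i - 1) (g, L) j).1.length = n ∧
    (∀ t, ((pvStep n ml (i - 1) (g, L) j).1.getD t []).length = (g.getD t []).length) ∧
    (∀ j' t, j' ≠ j → pvCell (pvStep n ml (i - 1) (g, L) j).1 t j' = pvCell g t j') ∧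
    ColInv lines (pvStep n ml (i - 1) (g, L) j).1 n (i - 1) j (bstep lines ml j (ℓ, 0) (i - 1)).1 := by
  obtain ⟨h1, h2, h3, h4, h5⟩ := hinv
  have hjrow : ∀ t, t < n → j < (g.getD t []).length := fun t ht =>
    lt_of_lt_of_le hj ((hrl t) ▸ hrect t ht)
  have hcell : pvCell g (i - 1) j = pvCell lines (i - 1) j := h1 _ (by omega)
  by_cases hO : pvCell g (i - 1) j = "O"
  · have hl0 : (0 : Int) ≤ ℓ := by omega
    have hrℓ : (ℓ.toNat : Int) = ℓ := Int.toNat_of_nonneg hl0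
    set r := ℓ.toNat with hr
    have hrn : r < n := by omega
    have hwr : pvWhile g n (i - 1) j (i - 1) = (if i - 1 < r then pvSet g (i - 1) j "." else g, r) :=
      pvWhile_run n (i - 1) j r hrn (r - (i - 1)) (i - 1) g rfl le_rfl (by omega)
        (fun t ht1 ht2 => h4 t (by omega) (by omega))
        (fun h6 => by
          have he : (ℓ + 1).toNat = r + 1 := by omega
          rw [← he]; exact h5 (by omega))
    have hstep : pvStep n ml (i - 1) (g, L) j =
        (pvSet (if i - 1 < r then pvSet g (i - 1) j "." else g) r j "O", L + (ml - (r : Int))) := by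
      simp only [pvStep, hO, if_pos, hwr]
    have hbO : pvCell lines (i - 1) j = "O" := hcell ▸ hO
    have hb : bstep lines ml j (ℓ, 0) (i - 1) = (ℓ - 1, 0 + (ml - ℓ)) := by
      simp [bstep, hbO]
    rw [hstep, hb]
    refine ⟨by rw [hrℓ]; ring, ?_, ?_, ?_, ?_, by omega, by omega, ?_, ?_⟩
    · split_ifs <;> simp [pvSet_length, hgn]
    · intro t; split_ifs <;> simp only [pvSet_rowlen]
    · intro j' t hne
      rw [pvCell_pvSet_ne_col _ hne]
      split_ifs
      · rw [pvCell_pvSet_ne_col _ hne]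
      · rfl
    · -- agreement below i-1
      intro t ht
      rw [pvCell_pvSet_ne_row _ (by omega)]
      split_ifs
      · rw [pvCell_pvSet_ne_row _ (by omega)]; exact h1 t (by omega)
      · exact h1 t (by omega)
    · -- dots i-1 .. ℓ-2
      dsimp only
      intro t ht1 ht2
      have htr : t < r := by omega
      have hir : i - 1 < r := by omega
      rw [pvCell_pvSet_ne_row _ (by omega), if_pos hir]
      rcases eq_or_ne t (i - 1) with rfl | hne
      · exact pvCell_pvSet_self g _ j "." (by omega) (hjrow _ (by omega))
      · rw [pvCell_pvSet_ne_row _ hne]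
        exact h4 t (by omega) (by omega)
    · -- stop at (ℓ-1)+1
      dsimp only
      intro hl
      have he : (ℓ - 1 + 1).toNat = r := by omega
      rw [he]
      have hrO : pvCell (pvSet (if i - 1 < r then pvSet g (i - 1) j "." else g) r j "O") r j = "O" := by
        apply pvCell_pvSet_self
        · split_ifs
          · rw [pvSet_length]; omega
          · omega
        · split_ifs
          · rw [pvSet_rowlen]; exact hjrow _ hrn
          · exact hjrow _ hrn
      rw [hrO]; exact fun hcon => by simp at hcon
  · have hstep : pvStep n ml (i - 1) (g, L) j = (g, L) := by
      simp [pvStep, hO]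
    have hbO : ¬ pvCell lines (i - 1) j = "O" := hcell ▸ hO
    by_cases hdot : pvCell g (i - 1) j = "."
    · have hbdot : pvCell lines (i - 1) j = "." := hcell ▸ hdot
      have hb : bstep lines ml j (ℓ, 0) (i - 1) = (ℓ, 0) := by
        simp [bstep, hbdot]
      rw [hstep, hb]
      refine ⟨by ring, hgn, fun t => rfl, fun j' t _ => rfl, ?_, by omega, h3, ?_, h5⟩
      · exact fun t ht => h1 t (by omega)
      · intro t ht1 ht2
        rcases eq_or_ne t (i - 1) with rfl | hne
        · exact hdot
        · exact h4 t (by omega) ht2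
    · have hbdot : ¬ pvCell lines (i - 1) j = "." := hcell ▸ hdot
      have hb : bstep lines ml j (ℓ, 0) (i - 1) = (((i - 1 : Nat) : Int) - 1, 0) := by
        simp [bstep, hbO, hbdot]
      rw [hstep, hb]
      have hic : ((i - 1 : Nat) : Int) = (i : Int) - 1 := by omega
      refine ⟨by ring, hgn, fun t => rfl, fun j' t _ => rfl, ?_, by omega, by omega, ?_, ?_⟩
      · exact fun t ht => h1 t (by omega)
      · intro t ht1 ht2; omega
      · intro hl
        have he : (((i - 1 : Nat) : Int) - 1 + 1).toNat = i - 1 := by omega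
        rw [he]; exact hdot

theorem bstep_pair (lines : List (List String)) (ml : Int) (j : Nat) (ℓ x : Int) (i : Nat) :
    bstep lines ml j (ℓ, x) i =
      ((bstep lines ml j (ℓ, 0) i).1, x + (bstep lines ml j (ℓ, 0) i).2) := by
  unfold bstep
  dsimp only
  split_ifs <;> simp

theorem inner_fold (lines : List (List String)) (ml : Int) (n m : Nat) (i : Nat)
    (hi1 : 1 ≤ i) (hin : i ≤ n) (hln : lines.length = n)
    (hrect : ∀ t, t < n → m ≤ (lines.getD t []).length) (ℓ : Nat → Int) :
    ∀ (p : Nat), p ≤ m → ∀ (g : List (List String)) (L : Int),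
    g.length = n → (∀ t, (g.getD t []).length = (lines.getD t []).length) →
    (∀ j, j < m → ColInv lines g n i j (ℓ j)) →
    ((List.range p).foldl (pvStep n ml (i - 1)) (g, L)).1.length = n ∧
    (∀ t, (((List.range p).foldl (pvStep n ml (i - 1)) (g, L)).1.getD t []).length
        = (lines.getD t []).length) ∧
    (∀ j t, p ≤ j → pvCell ((List.range p).foldl (pvStep n ml (i - 1)) (g, L)).1 t j = pvCell g t j) ∧
    ((List.range p).foldl (pvStep n ml (i - 1)) (g, L)).2
        = L + ∑ x ∈ Finset.range p, (bstep lines ml x (ℓ x, 0) (i - 1)).2 ∧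
    (∀ j, j < p → ColInv lines ((List.range p).foldl (pvStep n ml (i - 1)) (g, L)).1 n (i - 1) j
        ((bstep lines ml j (ℓ j, 0) (i - 1)).1)) := by
  intro p
  induction p with
  | zero =>
    intro _ g L hg1 hg2 hg3
    refine ⟨by simpa using hg1, by simpa using hg2, by simp, by simp, by simp⟩
  | succ p ih =>
    intro hp g L hg1 hg2 hg3
    obtain ⟨k1, k2, k3, k4, k5⟩ := ih (by omega) g L hg1 hg2 hg3
    set st := (List.range p).foldl (pvStep n ml (i - 1)) (g, L) with hst
    have hfold : (List.range (p + 1)).foldl (pvStep n ml (i - 1)) (g, L) = pvStep n ml (i - 1) st p := by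
      rw [List.range_succ, List.foldl_append]; rfl
    have hcp : ColInv lines st.1 n i p (ℓ p) :=
      ColInv_transfer lines g st.1 n i p (ℓ p) (fun t => k3 p t le_rfl) (hg3 p (by omega))
    obtain ⟨c1, c2, c3, c4, c5⟩ :=
      crux lines st.1 n m ml st.2 i p (ℓ p) k1 hln k2 hrect (by omega) hi1 hin hcp
    rw [hfold]
    refine ⟨c2, fun t => (c3 t).trans (k2 t), ?_, ?_, ?_⟩
    · intro j t hj
      exact ((c4 j t (by omega)).trans (k3 j t (by omega)))
    · rw [c1, k4, Finset.sum_range_succ]; ring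
    · intro j hj
      rcases eq_or_ne j p with rfl | hne
      · exact c5
      · exact ColInv_transfer lines st.1 _ n (i - 1) j _ (fun t => c4 j t hne)
          (k5 j (by omega))

theorem outer_fold (lines : List (List String)) (ml : Int) (n m : Nat)
    (hln : lines.length = n)
    (hrect : ∀ t, t < n → m ≤ (lines.getD t []).length) (hn : 1 ≤ n) :
    ∀ k, k ≤ n →
    (((List.range' (n - k) k).reverse).foldl
        (fun s i => (List.range m).foldl (pvStep n ml i) s) (lines, 0)).1.length = n ∧
    (∀ t, ((((List.range' (n - k) k).reverse).foldl
        (fun s i => (List.range m).foldl (pvStep n ml i) s) (lines, 0)).1.getD t []).length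
        = (lines.getD t []).length) ∧
    (((List.range' (n - k) k).reverse).foldl
        (fun s i => (List.range m).foldl (pvStep n ml i) s) (lines, 0)).2
      = ∑ j ∈ Finset.range m,
          (((List.range' (n - k) k).reverse).foldl (bstep lines ml j) ((n : Int) - 1, 0)).2 ∧
    (∀ j, j < m → ColInv lines (((List.range' (n - k) k).reverse).foldl
        (fun s i => (List.range m).foldl (pvStep n ml i) s) (lines, 0)).1 n (n - k) j
        ((((List.range' (n - k) k).reverse).foldl (bstep lines ml j) ((n : Int) - 1, 0)).1)) := by
  intro k
  induction k with
  | zero =>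
    intro _
    simp only [List.range'_zero, List.reverse_nil, List.foldl_nil]
    refine ⟨hln, ?_, ?_, ?_⟩
    · simp
    · simp
    intro j hj
    refine ⟨fun t ht => rfl, ?_, ?_, ?_, ?_⟩ <;> dsimp only
    · omega
    · omega
    · intro t ht1 ht2; exfalso; omega
    · intro hl; exfalso; omega
  | succ k ih =>
    intro hk
    obtain ⟨a1, a2, a3, a4⟩ := ih (by omega)
    have hsp : n - (k + 1) + 1 = n - k := by omega
    have hsplit : (List.range' (n - (k + 1)) (k + 1)).reverse
        = (List.range' (n - k) k).reverse ++ [n - (k + 1)] := by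
      rw [List.range'_succ, hsp, List.reverse_cons]
    set i := n - k with hidef
    have hi1 : 1 ≤ i := by omega
    have hii : i - 1 = n - (k + 1) := by omega
    set stA := ((List.range' (n - k) k).reverse).foldl
        (fun s i => (List.range m).foldl (pvStep n ml i) s) (lines, 0) with hstA
    obtain ⟨i1, i2, i3, i4, i5⟩ := inner_fold lines ml n m i hi1 (by omega) hln hrect
      (fun j => (((List.range' (n - k) k).reverse).foldl (bstep lines ml j) ((n : Int) - 1, 0)).1)
      m le_rfl stA.1 stA.2 a1 a2 a4
    have hAfold : ((List.range' (n - (k + 1)) (k + 1)).reverse).foldl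
        (fun s i => (List.range m).foldl (pvStep n ml i) s) (lines, 0)
        = (List.range m).foldl (pvStep n ml (i - 1)) (stA.1, stA.2) := by
      rw [hsplit, List.foldl_append, ← hstA, ← hii]
      rfl
    have hBfold : ∀ j, ((List.range' (n - (k + 1)) (k + 1)).reverse).foldl
        (bstep lines ml j) ((n : Int) - 1, 0)
        = bstep lines ml j (((List.range' (n - k) k).reverse).foldl
            (bstep lines ml j) ((n : Int) - 1, 0)) (i - 1) := by
      intro j
      rw [hsplit, List.foldl_append, ← hii]
      rfl
    rw [hAfold]
    refine ⟨i1, i2, ?_, ?_⟩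
    · rw [i4, a3]
      have : ∀ j ∈ Finset.range m,
          (((List.range' (n - (k + 1)) (k + 1)).reverse).foldl (bstep lines ml j) ((n : Int) - 1, 0)).2
          = (((List.range' (n - k) k).reverse).foldl (bstep lines ml j) ((n : Int) - 1, 0)).2
            + (bstep lines ml j
                ((((List.range' (n - k) k).reverse).foldl (bstep lines ml j) ((n : Int) - 1, 0)).1, 0)
                (i - 1)).2 := by
        intro j _
        rw [hBfold j, bstep_pair]
      rw [Finset.sum_congr rfl this, Finset.sum_add_distrib]
    · intro j hj
      have := i5 j hj
      rw [hii] at this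
      rw [hBfold j, bstep_pair]
      exact this

theorem bfold_shift (lines : List (List String)) (ml : Int) (j : Nat) :
    ∀ (rows : List Nat) (ℓ x : Int),
    rows.foldl (bstep lines ml j) (ℓ, x)
      = ((rows.foldl (bstep lines ml j) (ℓ, 0)).1,
          x + (rows.foldl (bstep lines ml j) (ℓ, 0)).2) := by
  intro rows
  induction rows with
  | nil => intro ℓ x; simp
  | cons i rest ih =>
    intro ℓ x
    simp only [List.foldl_cons]
    rw [bstep_pair lines ml j ℓ x i]
    have hb : rest.foldl (bstep lines ml j) (bstep lines ml j (ℓ, 0) i)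
        = rest.foldl (bstep lines ml j)
            ((bstep lines ml j (ℓ, 0) i).1, (bstep lines ml j (ℓ, 0) i).2) := rfl
    rw [ih (bstep lines ml j (ℓ, 0) i).1 (x + (bstep lines ml j (ℓ, 0) i).2), hb,
      ih (bstep lines ml j (ℓ, 0) i).1 (bstep lines ml j (ℓ, 0) i).2, add_assoc]

theorem alt_sum (lines : List (List String)) (ml : Int) (n : Nat) :
    ∀ p, (List.range p).foldl
        (fun load j => (((List.range n).reverse).foldl (bstep lines ml j) ((n : Int) - 1, load)).2) 0
      = ∑ j ∈ Finset.range p,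
          (((List.range n).reverse).foldl (bstep lines ml j) ((n : Int) - 1, 0)).2 := by
  intro p
  induction p with
  | zero => simp
  | succ p ih =>
    rw [List.range_succ, List.foldl_append, ih, Finset.sum_range_succ]
    simp only [List.foldl_cons, List.foldl_nil]
    rw [bfold_shift lines ml p ((List.range n).reverse) ((n : Int) - 1)
      (∑ j ∈ Finset.range p, (((List.range n).reverse).foldl (bstep lines ml j) ((n : Int) - 1, 0)).2)]

theorem final (lines : List (List String)) (ml : Int)
    (hne : lines ≠ []) (hrect0 : ∀ r ∈ lines, (lines.getD 0 []).length ≤ r.length) :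
    rollSouth lines ml = rollSouth_alt lines ml := by
  have hn : 1 ≤ lines.length := List.length_pos_iff.mpr hne
  have hrect : ∀ t, t < lines.length →
      (lines.getD 0 []).length ≤ (lines.getD t []).length := by
    intro t ht
    have hmem : lines.getD t [] ∈ lines := by
      rw [List.getD_eq_getElem?_getD, List.getElem?_eq_getElem ht]
      exact List.getElem_mem ht
    exact hrect0 _ hmem
  obtain ⟨o1, o2, o3, o4⟩ := outer_fold lines ml lines.length ((lines.getD 0 []).length)
    rfl hrect hn lines.length le_rfl
  have hr : List.range' (lines.length - lines.length) lines.length = List.range lines.length := by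
    rw [Nat.sub_self, ← List.range_eq_range']
  rw [hr] at o3
  simp only [rollSouth, rollSouth_alt]
  rw [alt_sum lines ml lines.length ((lines.getD 0 []).length)]
  exact o3

-- ===== VERDICT (by name: the statement is the Claim_ definition above) =====
theorem rollSouth_spec : Claim_equal_rollSouth := by
  intro lines max_load _ hpre
  exact final lines max_load hpre.1 hpre.2
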